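-- pv_equiv track=rewrite | github.com/bincan98/algorithm | 프로그래머스/lv2/42626. 더 맵게/더 맵게.py | solution
-- ===== SOURCE A (Python) =====
-- import heapq
--
-- def solution(scoville, K):
--     heapq.heapify(scoville)
--
--     answer = 0
--     while True:
--         a = heapq.heappop(scoville)
--         if a >= K:
--             break
--         elif a < K and not scoville:
--             answer = -1
--             break
--
--         b = heapq.heappop(scoville)
--
--         heapq.heappush(scoville, a + b * 2)
--         answer += 1
--
--     return answer
-- ===== SOURCE B (Python) =====
-- def _insort(s, x):
--     # insert x into the ascending-sorted list s, after any equal entries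
--     i = 0
--     while i < len(s) and s[i] <= x:
--         i += 1
--     s.insert(i, x)
--
--
-- def solution(scoville, K):
--     s = sorted(scoville)
--     answer = 0
--     while True:
--         a = s[0]
--         if a >= K:
--             return answer
--         if len(s) == 1:
--             return -1
--         b = s[1]
--         s = s[2:]
--         _insort(s, a + b * 2)
--         answer += 1
-- ===== Notes on version B (the rewrite author's own statement) =====
-- stated objective: alternative
-- what changed: B keeps the foods in a plain ascending sorted list (sort once, read the two smallest at the front, re-insert the mix by ordered insertion) instead of A's binary heap with heapify/heappop/heappush.
import Mathlib
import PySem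

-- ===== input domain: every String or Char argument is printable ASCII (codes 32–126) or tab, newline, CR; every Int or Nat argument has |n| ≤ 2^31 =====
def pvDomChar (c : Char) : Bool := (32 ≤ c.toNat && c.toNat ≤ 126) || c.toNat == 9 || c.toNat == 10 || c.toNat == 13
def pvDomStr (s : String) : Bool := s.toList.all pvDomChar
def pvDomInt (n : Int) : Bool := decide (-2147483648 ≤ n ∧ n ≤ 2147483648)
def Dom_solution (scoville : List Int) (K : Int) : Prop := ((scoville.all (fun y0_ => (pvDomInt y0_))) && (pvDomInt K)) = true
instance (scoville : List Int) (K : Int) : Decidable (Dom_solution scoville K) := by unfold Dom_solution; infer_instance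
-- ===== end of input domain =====

-- B maintains a plain ascending sorted list (sort once, pop from the front, ordered re-insert)
-- instead of A's binary heap; return values are proved equal. Note: the Python A mutates its
-- scoville argument in place (heapify/heappop); B copies it — only the RETURN value is claimed.


-- ===== PORT A =====
-- The heapq library calls are ported by their value-level semantics, which is EXACT for Int
-- elements: heappop returns the minimum value and removes one occurrence of it, heappush adds
-- its value, heapify only rearranges — every value A's own code sees depends only on the
-- multiset of elements, never on the heap's internal layout.
def heappopA (l : List Int) : Option (Int × List Int) :=
  match PySem.List.min? l (fun x => x) with
  | none => none                       -- heappop on an empty heap: IndexError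
  | some m => some (m, l.erase m)

theorem heappopA_length {l : List Int} {a : Int} {r : List Int}
    (h : heappopA l = some (a, r)) : r.length + 1 = l.length := by
  unfold heappopA at h
  cases hm : PySem.List.min? l (fun x => x) with
  | none => rw [hm] at h; simp at h
  | some m =>
    rw [hm] at h
    simp only [Option.some.injEq, Prod.mk.injEq] at h
    have hmem : m ∈ l := PySem.List.min?_mem hm
    have hpos : 0 < l.length := List.length_pos_of_mem hmem
    rw [← h.2, List.length_erase_of_mem hmem]
    omega

def loopA (heap : List Int) (K : Int) (answer : Int) : Int :=
  match hp : heappopA heap with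
  | none => answer                     -- empty heap: the Python raises IndexError (outside Pre_)
  | some (a, rest) =>
    if a ≥ K then answer
    else if rest = [] then -1
    else
      match hp2 : heappopA rest with
      | none => answer                 -- unreachable: rest ≠ []
      | some (b, rest2) => loopA (rest2 ++ [a + b * 2]) K (answer + 1)
termination_by heap.length
decreasing_by
  have h1 := heappopA_length hp
  have h2 := heappopA_length hp2
  simp only [List.length_append, List.length_cons, List.length_nil]
  omega

def solution (scoville : List Int) (K : Int) : Int :=
  loopA scoville K 0

-- ===== PORT B =====
def insortB (s : List Int) (x : Int) : List Int :=
  match s with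
  | [] => [x]
  | y :: ys => if y ≤ x then y :: insortB ys x else x :: y :: ys

theorem insortB_length (s : List Int) (x : Int) : (insortB s x).length = s.length + 1 := by
  induction s with
  | nil => rfl
  | cons y ys ih => unfold insortB; split <;> simp [ih]

def loopB (s : List Int) (K : Int) (answer : Int) : Int :=
  match s with
  | [] => answer                       -- s[0] on empty: the Python raises IndexError (outside Pre_)
  | [a] => if a ≥ K then answer else -1
  | a :: b :: rest =>
    if a ≥ K then answer
    else loopB (insortB rest (a + b * 2)) K (answer + 1)
termination_by s.length
decreasing_by simp [insortB_length]

def solution_alt (scoville : List Int) (K : Int) : Int :=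
  loopB (PySem.List.sorted scoville (fun x => x) false) K 0

-- ===== PRECONDITION & SPEC =====
-- Pre_ excludes only the empty list, on which A's first heappop raises IndexError.
def Pre_solution (scoville : List Int) (K : Int) : Prop := scoville ≠ []
instance (scoville : List Int) (K : Int) : Decidable (Pre_solution scoville K) := by unfold Pre_solution; infer_instance
def pvWitness_solution : List Int × Int := ([1, 2, 3], 7)

def Spec_solution (scoville : List Int) (K : Int) (out : Int) : Prop := out = solution_alt scoville K
instance (scoville : List Int) (K : Int) (out : Int) : Decidable (Spec_solution scoville K out) := by unfold Spec_solution; infer_instance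

-- ===== CLAIM (what is proved, stated in full; the proofs are below) =====
def Claim_equal_solution : Prop := ∀ (scoville : List Int) (K : Int), Dom_solution scoville K → Pre_solution scoville K → Spec_solution scoville K (solution scoville K)

-- ===== LEMMAS AND PROOFS =====

theorem mem_insortB {s : List Int} {x z : Int} : z ∈ insortB s x ↔ z = x ∨ z ∈ s := by
  induction s with
  | nil => simp [insortB]
  | cons y ys ih => unfold insortB; split <;> simp [ih] <;> tauto

theorem insortB_perm (s : List Int) (x : Int) : (insortB s x).Perm (x :: s) := by
  induction s with
  | nil => rfl
  | cons y ys ih =>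
    unfold insortB; split
    · exact (ih.cons y).trans (List.Perm.swap x y ys)
    · rfl

theorem insortB_pairwise {s : List Int} {x : Int} (h : s.Pairwise (· ≤ ·)) :
    (insortB s x).Pairwise (· ≤ ·) := by
  induction s with
  | nil => simp [insortB]
  | cons y ys ih =>
    rw [List.pairwise_cons] at h
    unfold insortB; split
    · rename_i hyx
      rw [List.pairwise_cons]
      refine ⟨?_, ih h.2⟩
      intro z hz
      rcases mem_insortB.mp hz with rfl | hz
      · exact hyx
      · exact h.1 z hz
    · rename_i hyx
      rw [List.pairwise_cons]
      refine ⟨?_, List.pairwise_cons.mpr h⟩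
      intro z hz
      rcases List.mem_cons.mp hz with rfl | hz
      · omega
      · exact le_trans (by omega) (h.1 z hz)

theorem min?_of_perm_sorted {h t : List Int} {a : Int}
    (hp : h.Perm (a :: t)) (hs : (a :: t).Pairwise (· ≤ ·)) :
    PySem.List.min? h (fun x => x) = some a := by
  cases hm : PySem.List.min? h (fun x => x) with
  | none =>
    rw [PySem.List.min?_eq_none_iff] at hm
    subst hm
    exact absurd hp.symm.eq_nil (by simp)
  | some m =>
    have hmem : m ∈ h := PySem.List.min?_mem hm
    have hmin : ∀ y ∈ h, m ≤ y := by
      intro y hy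
      simpa using PySem.List.min?_isMin hm y hy
    have ha : a ∈ h := hp.mem_iff.mpr (List.mem_cons_self)
    have h1 : m ≤ a := hmin a ha
    have h2 : a ≤ m := by
      rcases List.mem_cons.mp (hp.mem_iff.mp hmem) with rfl | hm'
      · exact le_refl _
      · exact (List.pairwise_cons.mp hs).1 m hm'
    congr 1
    omega

theorem loopA_pop {h : List Int} {a : Int} {r : List Int} (hpop : heappopA h = some (a, r))
    (K ans : Int) :
    loopA h K ans =
      (if a ≥ K then ans
       else if r = [] then -1
       else match heappopA r with
         | none => ans
         | some (b, rest2) => loopA (rest2 ++ [a + b * 2]) K (ans + 1)) := by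
  rw [loopA]
  split
  · rename_i heq; rw [hpop] at heq; cases heq
  · rename_i a' rest' heq
    rw [hpop] at heq
    injection heq with heq'
    cases heq'
    by_cases hK : a ≥ K
    · simp [hK]
    · simp only [hK, if_false]
      by_cases hr : r = []
      · simp [hr]
      · simp only [hr, if_false]
        split
        · rename_i heq2; rw [heq2]
        · rename_i b rest2 heq2; rw [heq2]

theorem loop_eq : ∀ (n : Nat) (h s : List Int) (K ans : Int), s.length = n →
    h.Perm s → s.Pairwise (· ≤ ·) → loopA h K ans = loopB s K ans := by
  intro n
  induction n using Nat.strong_induction_on with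
  | _ n ih =>
    intro h s K ans hlen hp hs
    match s with
    | [] =>
      have : h = [] := hp.eq_nil
      subst this
      rw [loopA, loopB]
      simp [heappopA, PySem.List.min?]
    | [a] =>
      have hmin := min?_of_perm_sorted hp hs
      have herase : h.erase a = [] := ((hp.erase a).trans (by simp)).eq_nil
      have hpop : heappopA h = some (a, h.erase a) := by unfold heappopA; rw [hmin]
      rw [loopA_pop hpop, loopB]
      simp [herase]
    | a :: b :: t =>
      have hmin := min?_of_perm_sorted hp hs
      have hrest : (h.erase a).Perm (b :: t) := by
        have := hp.erase a
        rwa [List.erase_cons_head] at this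
      have hrest_ne : h.erase a ≠ [] := by
        intro hnil
        rw [hnil] at hrest
        exact absurd hrest.symm.eq_nil (by simp)
      have hs' : (b :: t).Pairwise (· ≤ ·) := (List.pairwise_cons.mp hs).2
      have hmin2 := min?_of_perm_sorted hrest hs'
      have hrest2 : ((h.erase a).erase b).Perm t := by
        have := hrest.erase b
        rwa [List.erase_cons_head] at this
      have hpop : heappopA h = some (a, h.erase a) := by unfold heappopA; rw [hmin]
      have hpop2 : heappopA (h.erase a) = some (b, (h.erase a).erase b) := by
        unfold heappopA; rw [hmin2]
      rw [loopA_pop hpop, hpop2, loopB]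
      by_cases hK : a ≥ K
      · simp [hK]
      · simp only [hK, if_false, hrest_ne]
        apply ih (n - 1) (by simp at hlen; omega)
        · rw [insortB_length]
          simp at hlen; omega
        · exact (List.perm_append_singleton _ _).trans
            ((hrest2.cons _).trans (insortB_perm t (a + b * 2)).symm)
        · exact insortB_pairwise (List.pairwise_cons.mp hs').2

-- ===== VERDICT (by name: the statement is the Claim_ definition above) =====
theorem solution_spec : Claim_equal_solution := by
  intro scoville K _hdom _hpre
  unfold Spec_solution solution solution_alt
  exact loop_eq _ scoville _ K 0 rfl (PySem.List.sorted_perm scoville (fun x => x) false).symm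
    (by simpa using PySem.List.sorted_pairwise scoville (fun x => x))
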